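-- pv_equiv track=rewrite | github.com/iftitutul/Crash-Course-on-Python | code-exam/roch/test-1.py | solution
-- ===== SOURCE A (Python) =====
-- def solution(S):
--     b_flag = 0
--     ans = True
--     for c in S:
--         if c == 'b':
--             b_flag = 1
--         elif b_flag and c == 'a':
--             ans = False
--
--     return ans
-- ===== SOURCE B (Python) =====
-- def solution(S):
--     # True iff no 'a' occurs after some 'b': locate the first 'b', then
--     # check the suffix from there contains no 'a'.
--     if 'b' not in S:
--         return True
--     idx = S.index('b')
--     return 'a' not in S[idx:]
-- ===== Notes on version B (the rewrite author's own statement) =====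
-- stated objective: idiomatic
-- what changed: Replaces A's flag-threaded per-character loop with locating the first 'b' via str.index and a membership test ('a' not in suffix) on the slice from there.
import Mathlib
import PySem

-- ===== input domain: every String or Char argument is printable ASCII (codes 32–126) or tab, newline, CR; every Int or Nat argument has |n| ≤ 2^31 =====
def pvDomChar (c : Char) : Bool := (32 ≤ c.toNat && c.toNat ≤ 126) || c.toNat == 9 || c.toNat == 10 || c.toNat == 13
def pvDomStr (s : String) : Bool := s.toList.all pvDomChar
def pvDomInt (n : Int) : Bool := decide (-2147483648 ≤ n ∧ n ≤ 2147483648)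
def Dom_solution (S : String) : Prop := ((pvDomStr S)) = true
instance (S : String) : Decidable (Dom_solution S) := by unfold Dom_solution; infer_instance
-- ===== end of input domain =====

-- B replaces A's flag-threaded loop by first-'b' location + membership scan of the suffix (idiomatic; same return value).

-- ===== PORT A =====
-- the loop threads (b_flag, ans); b_flag is a Python int used truthily (≠ 0)
def solution (S : String) : Bool :=
  (S.toList.foldl
    (fun (st : Int × Bool) c =>
      if c = 'b' then (1, st.2)
      else if st.1 ≠ 0 ∧ c = 'a' then (st.1, false)
      else st)
    (0, true)).2

-- ===== PORT B =====
-- S.index('b') is ported as PySem.Chars.find: 'b' is guaranteed present by the guard, where index = find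
def solution_alt (S : String) : Bool :=
  if PySem.Str.isIn "b" S = false then true
  else ! PySem.Str.isIn "a" (PySem.Str.slice S (some (PySem.Str.find S "b")) none)

-- ===== PRECONDITION & SPEC =====
def Spec_solution (S : String) (out : Bool) : Prop := out = solution_alt S
instance (S : String) (out : Bool) : Decidable (Spec_solution S out) := by unfold Spec_solution; infer_instance

-- ===== CLAIM (what is proved, stated in full; the proofs are below) =====
def Claim_equal_solution : Prop := ∀ (S : String), Dom_solution S → Spec_solution S (solution S)

-- ===== LEMMAS AND PROOFS =====

-- canonical form both ports are reduced to
def goodChars (cs : List Char) : Bool :=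
  match PySem.List.index? cs 'b' with
  | none => true
  | some k => decide ('a' ∉ cs.drop k)

theorem isIn_singleton (c : Char) (s : List Char) :
    PySem.Chars.isIn [c] s = decide (c ∈ s) := by
  by_cases h : c ∈ s
  · have := (PySem.Chars.isIn_iff_infix [c] s).mpr ((List.singleton_infix_iff c s).mpr h)
    simp [this, h]
  · have := (PySem.Chars.isIn_eq_false_iff [c] s).mpr
      (fun hc => h ((List.singleton_infix_iff c s).mp hc))
    simp [this, h]

theorem goodChars_cons_b (cs : List Char) :
    goodChars ('b' :: cs) = decide ('a' ∉ cs) := by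
  unfold goodChars
  rw [PySem.List.index?_cons_self]
  simp

theorem goodChars_cons_ne (c : Char) (cs : List Char) (h : c ≠ 'b') :
    goodChars (c :: cs) = goodChars cs := by
  unfold goodChars
  rw [PySem.List.index?_cons_of_ne cs h]
  cases hx : PySem.List.index? cs 'b' with
  | none => simp
  | some k => simp

theorem foldl_good (cs : List Char) (flag : Int) (ans : Bool) :
    (cs.foldl
      (fun (st : Int × Bool) c =>
        if c = 'b' then (1, st.2)
        else if st.1 ≠ 0 ∧ c = 'a' then (st.1, false)
        else st)
      (flag, ans)).2
    = (ans && (if flag = 0 then goodChars cs else decide ('a' ∉ cs))) := by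
  induction cs generalizing flag ans with
  | nil => simp [goodChars, PySem.List.index?]
  | cons c cs ih =>
    by_cases hb : c = 'b'
    · subst hb
      simp only [List.foldl_cons, ih]
      rw [goodChars_cons_b]
      norm_num
      split_ifs <;> simp
    · by_cases ha : flag ≠ 0 ∧ c = 'a'
      · obtain ⟨hf, hA⟩ := ha
        subst hA
        simp only [List.foldl_cons, if_neg hb, ih]
        rw [goodChars_cons_ne _ _ hb]
        simp [hf]
      · simp only [List.foldl_cons, if_neg hb, if_neg ha, ih]
        rw [goodChars_cons_ne _ _ hb]
        push_neg at ha
        by_cases hf : flag = 0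
        · simp [hf]
        · have hca : c ≠ 'a' := ha hf
          have : ('a' : Char) ≠ c := fun hh => hca hh.symm
          simp [hf, this]

theorem index?_eq_some_toNat_find (cs : List Char) (c : Char) (h : c ∈ cs) :
    PySem.List.index? cs c = some (PySem.Chars.find cs [c]).toNat := by
  have hin : [c] <:+: cs := (List.singleton_infix_iff c cs).mpr h
  have hpos : 0 ≤ PySem.Chars.find cs [c] := (PySem.Chars.find_nonneg_iff cs [c]).mpr hin
  obtain ⟨hpre, hmin⟩ := PySem.Chars.find_spec (s := cs) (sub := [c]) hpos
  set k := (PySem.Chars.find cs [c]).toNat with hk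
  obtain ⟨t, ht⟩ := hpre
  simp only [List.singleton_append] at ht
  have ht' : cs.drop k = c :: t := ht.symm
  have hklen : k ≤ cs.length := by
    by_contra hlt
    push_neg at hlt
    have hnil : cs.drop k = [] := List.drop_eq_nil_of_le (le_of_lt hlt)
    rw [hnil] at ht'
    exact List.cons_ne_nil _ _ ht'.symm
  rw [PySem.List.index?_eq_some_iff]
  refine ⟨cs.take k, t, ?_, ?_, ?_⟩
  · nth_rewrite 1 [← List.take_append_drop k cs]
    rw [ht']
  · simp [List.length_take, hklen]
  · intro hcmem
    obtain ⟨i, hi, hget⟩ := List.getElem_of_mem hcmem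
    have hik : i < k := by
      have := hi
      simp [List.length_take] at this
      omega
    have hilen : i < cs.length := by omega
    have hdrop : cs.drop i = c :: cs.drop (i + 1) := by
      rw [List.drop_eq_getElem_cons hilen]
      congr 1
      rw [← hget]
      simp [List.getElem_take]
    exact hmin i hik ⟨cs.drop (i + 1), by simp [hdrop]⟩

theorem solution_alt_eq_good (S : String) : solution_alt S = goodChars S.toList := by
  have hb' : ("b" : String).toList = ['b'] := rfl
  have ha' : ("a" : String).toList = ['a'] := rfl
  unfold solution_alt
  by_cases h : 'b' ∈ S.toList
  · have hin : PySem.Chars.isIn ['b'] S.toList = true :=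
      (PySem.Chars.isIn_iff_infix ['b'] S.toList).mpr ((List.singleton_infix_iff 'b' S.toList).mpr h)
    rw [if_neg (by simp [PySem.Str.isIn_eq, hb', hin])]
    have hnn : 0 ≤ PySem.Chars.find S.toList ['b'] :=
      (PySem.Chars.find_nonneg_iff S.toList ['b']).mpr ((List.singleton_infix_iff 'b' S.toList).mpr h)
    have hfind := index?_eq_some_toNat_find S.toList 'b' h
    unfold goodChars
    rw [hfind]
    rw [PySem.Str.isIn_eq, ha', PySem.Str.toList_slice, PySem.Chars.slice_eq_listSlice,
        PySem.Str.find_eq, hb', PySem.List.slice_from _ hnn, isIn_singleton]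
    simp
  · have hout : PySem.Str.isIn "b" S = false := by
      rw [PySem.Str.isIn_eq, hb']
      exact (PySem.Chars.isIn_eq_false_iff ['b'] S.toList).mpr
        (fun hc => h ((List.singleton_infix_iff 'b' S.toList).mp hc))
    rw [if_pos hout]
    unfold goodChars
    rw [(PySem.List.index?_eq_none_iff S.toList 'b').mpr h]

-- ===== VERDICT (by name: the statement is the Claim_ definition above) =====
theorem solution_spec : Claim_equal_solution := by
  intro S _
  unfold Spec_solution solution
  rw [solution_alt_eq_good, foldl_good]
  simp
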